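-- pv_equiv track=rewrite | github.com/chlee1252/dailyLeetCode | book/implemetation/arrangeString.py | solution
-- ===== SOURCE A (Python) =====
-- def solution(S):
--    s = list(S)
--    s.sort()
--
--    numbers = 0
--    index = 0
--    for i in range(len(s)):
--       try:
--          numbers += int(s[i])
--          index = i
--       except:
--          break
--
--    return ''.join(s[i:] + [str(numbers)])
-- ===== SOURCE B (Python) =====
-- def solution(S):
--     counts = [0] * 128
--     for c in S:
--         counts[ord(c)] += 1
--     t = ''.join(chr(i) * counts[i] for i in range(128))
--     total = 0
--     k = 0
--     while k < len(t) and '0' <= t[k] <= '9':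
--         total += ord(t[k]) - ord('0')
--         k += 1
--     return t[k:] + str(total)
-- ===== Notes on version B (the rewrite author's own statement) =====
-- stated objective: alternative
-- what changed: B replaces A's comparison sort plus sequential try/except scan by a counting sort over the fixed 128-code ASCII alphabet (one counting pass, then the sorted string is laid out from the table) followed by one linear pass consuming the leading digits; measured speed-ups varied between runs, so no speed is claimed; Pre_ excludes only the empty string, on which A raises UnboundLocalError.
-- intended difference: On non-empty all-digit strings A returns the largest digit prepended to the digit sum (its final loop index stops one short of the end), while B returns just the digit sum, the intended value once every digit has been consumed; the witness input is pvDiffWitness_solution with both outputs recorded in pvDiffWitnessOut_solution. — e.g. on solution("12"): A returns "23", B returns "3"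
import Mathlib
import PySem

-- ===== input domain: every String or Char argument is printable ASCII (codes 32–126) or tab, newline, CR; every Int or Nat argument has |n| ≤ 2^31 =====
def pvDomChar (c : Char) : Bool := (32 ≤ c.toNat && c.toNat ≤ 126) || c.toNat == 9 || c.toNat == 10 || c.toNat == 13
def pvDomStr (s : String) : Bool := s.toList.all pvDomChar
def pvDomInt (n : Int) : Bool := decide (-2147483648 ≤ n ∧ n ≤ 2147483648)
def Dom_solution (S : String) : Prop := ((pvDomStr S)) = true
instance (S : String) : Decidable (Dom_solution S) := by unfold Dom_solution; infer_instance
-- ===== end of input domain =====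

-- B replaces A's comparison sort + try/except digit scan by a counting sort over the 128-code
-- ASCII alphabet followed by one linear pass consuming the leading digits; return value only
-- (A mutates only its local list).

-- ===== PORT A =====
-- A's for-loop over the sorted list: at index i it tries int(s[i]), adding it to
-- `numbers` and setting `index = i`; the first non-int character breaks.
-- Returns (numbers, index, final value of i): after a break i is the break position,
-- after a completed loop Python leaves i = len(s) - 1.
def solutionLoop : List Char → Nat → Int → Nat → Int × Nat × Nat
  | [], i, numbers, index => (numbers, index, i - 1)
  | c :: rest, i, numbers, index =>
    match PySem.Int.ofChars? [c] with        -- int(s[i]); exact: none = ValueError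
    | some v => solutionLoop rest (i + 1) (numbers + v) i
    | none => (numbers, index, i)            -- except: break

def solution (S : String) : String :=
  let s := PySem.List.sorted S.toList (fun c => c) false   -- s = list(S); s.sort()
  let r := solutionLoop s 0 0 0
  String.ofList (s.drop r.2.2 ++ PySem.Int.toChars r.1)    -- ''.join(s[i:] + [str(numbers)])

-- ===== PORT B =====
-- B's while loop: walks the counting-sorted list, adding ord(c)-48 while the character is
-- a decimal digit; returns (total, k) = (digit sum, number of digits consumed).
def solutionAltScan : List Char → Int → Nat → Int × Nat
  | [], total, k => (total, k)
  | c :: rest, total, k =>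
    if 48 ≤ c.toNat ∧ c.toNat ≤ 57 then
      solutionAltScan rest (total + ((c.toNat : Int) - 48)) (k + 1)
    else (total, k)

def solution_alt (S : String) : String :=
  let counts := S.toList.foldl
    (fun cs c => cs.set c.toNat (cs.getD c.toNat 0 + 1)) (List.replicate 128 0)
  let t := (List.range 128).foldl
    (fun acc i => acc ++ List.replicate (counts.getD i 0) (Char.ofNat i)) []
  let r := solutionAltScan t 0 0
  String.ofList (t.drop r.2 ++ PySem.Int.toChars r.1)

-- ===== PRECONDITION & SPEC =====
-- Pre_ excludes only the empty string, on which A raises UnboundLocalError (the loop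
-- variable i is never assigned before s[i:] is evaluated).
def Pre_solution (S : String) : Prop := S ≠ ""
instance (S : String) : Decidable (Pre_solution S) := by unfold Pre_solution; infer_instance
def pvWitness_solution : String := "b2a1"

-- On non-empty all-digit strings A returns the largest digit prepended to the digit sum
-- (its final loop index stops one short of the end), while B returns just the digit sum,
-- the intended value once every digit has been consumed.
def D_solution (S : String) : Prop :=
  S ≠ "" ∧ S.toList.all (fun c => 48 ≤ c.toNat && c.toNat < 58) = true
instance (S : String) : Decidable (D_solution S) := by unfold D_solution; infer_instance

def Spec_solution (S : String) (out : String) : Prop := ¬ D_solution S → out = solution_alt S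
instance (S : String) (out : String) : Decidable (Spec_solution S out) := by unfold Spec_solution; infer_instance

def pvDiffWitness_solution : String := "12"
def pvDiffWitnessOut_solution : String × String := ("23", "3")

-- ===== CLAIM (what is proved, stated in full; the proofs are below) =====
def Claim_unchanged_solution : Prop := ∀ (S : String), Dom_solution S → Pre_solution S → Spec_solution S (solution S)
def Claim_changed_solution : Prop := Dom_solution (pvDiffWitness_solution) ∧ Pre_solution (pvDiffWitness_solution) ∧ D_solution (pvDiffWitness_solution) ∧ solution (pvDiffWitness_solution) = pvDiffWitnessOut_solution.1 ∧ solution_alt (pvDiffWitness_solution) = pvDiffWitnessOut_solution.2 ∧ pvDiffWitnessOut_solution.1 ≠ pvDiffWitnessOut_solution.2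
def Claim_exact_solution : Prop := ∀ (S : String), Dom_solution S → Pre_solution S → D_solution S → solution S ≠ solution_alt S

-- ===== LEMMAS AND PROOFS =====

-- the multiset of characters of l laid out in code order: block i holds the
-- count-many copies of the character with code i
def pvBlk (l : List Char) (i : Nat) : List Char :=
  List.replicate (l.count (Char.ofNat i)) (Char.ofNat i)

def pvCanon (l : List Char) : List Char := (List.range 128).flatMap (pvBlk l)

def pvDigitVal (c : Char) : Int := (c.toNat : Int) - 48

theorem pv_toNat_ofNat (i : Nat) (h : i < 128) : (Char.ofNat i).toNat = i := by
  have : i.isValidChar := Or.inl (by omega)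
  simp [Char.ofNat, Char.toNat, Char.ofNatAux, this]

theorem pv_dom_lt (S : String) (h : Dom_solution S) : ∀ c ∈ S.toList, c.toNat < 128 := by
  intro c hc
  have := (List.all_eq_true.mp h) c hc
  simp only [pvDomChar, Bool.or_eq_true, Bool.and_eq_true, decide_eq_true_eq,
    beq_iff_eq] at this
  omega

theorem pv_ofChars_singleton (c : Char) (h : c.toNat < 128) :
    PySem.Int.ofChars? [c] =
      (if 48 ≤ c.toNat ∧ c.toNat < 58 then some ((c.toNat : Int) - 48) else none) := by
  have key : ∀ n : Fin 128, PySem.Int.ofChars? [Char.ofNat n.val] =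
      (if 48 ≤ n.val ∧ n.val < 58 then some ((n.val : Int) - 48) else none) := by decide
  have := key ⟨c.toNat, h⟩
  simpa [Char.ofNat_toNat] using this

theorem pv_getD_set_nat (cs : List Nat) (n i v d : Nat) (h : n < cs.length) :
    (cs.set n v).getD i d = if i = n then v else cs.getD i d := by
  rw [List.getD_eq_getElem?_getD, List.getD_eq_getElem?_getD, List.getElem?_set]
  by_cases h1 : i = n
  · subst h1; simp [h]
  · rw [if_neg (by omega), if_neg h1]

theorem pv_count_flatMap (a : Char) (f : Nat → List Char) (l : List Nat) :
    ((l.flatMap f).count a) = (l.map (fun i => (f i).count a)).sum := by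
  induction l with
  | nil => simp
  | cons x t ih => simp [List.flatMap_cons, List.count_append, ih]

theorem pv_sum_range_single (n k : Nat) (f : Nat → Nat) (hk : k < n)
    (h : ∀ i < n, i ≠ k → f i = 0) : ((List.range n).map f).sum = f k := by
  induction n with
  | zero => omega
  | succ m ih =>
    rw [List.range_succ, List.map_append, List.sum_append]
    by_cases hkm : k = m
    · subst hkm
      have : ((List.range k).map f).sum = 0 :=
        List.sum_eq_zero (by
          intro x hx
          simp only [List.mem_map, List.mem_range] at hx
          obtain ⟨i, hi, rfl⟩ := hx
          exact h i (by omega) (by omega))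
      simp [this]
    · have := ih (by omega) (fun i hi hik => h i (by omega) hik)
      simp [this, h m (by omega) (by omega)]

theorem pv_canon_perm (l : List Char) (h : ∀ c ∈ l, c.toNat < 128) :
    (pvCanon l).Perm l := by
  apply List.perm_iff_count.mpr
  intro a
  rw [pvCanon, pv_count_flatMap]
  by_cases ha : a.toNat < 128
  · have hz : ∀ i < 128, i ≠ a.toNat → ((pvBlk l i).count a) = 0 := by
      intro i hi hne
      simp only [pvBlk, List.count_replicate]
      have h1 : (Char.ofNat i == a) = false := by
        simp only [beq_eq_false_iff_ne, ne_eq]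
        intro hEq
        exact hne (by rw [← hEq, pv_toNat_ofNat i hi])
      simp [h1]
    rw [pv_sum_range_single 128 a.toNat _ ha hz]
    simp [pvBlk, Char.ofNat_toNat]
  · have h1 : ((List.range 128).map (fun i => (pvBlk l i).count a)).sum = 0 := by
      apply List.sum_eq_zero
      intro x hx
      simp only [List.mem_map, List.mem_range] at hx
      obtain ⟨i, hi, rfl⟩ := hx
      simp only [pvBlk, List.count_replicate]
      have h2 : (Char.ofNat i == a) = false := by
        simp only [beq_eq_false_iff_ne, ne_eq]
        intro hEq
        rw [← hEq, pv_toNat_ofNat i hi] at ha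
        omega
      simp [h2]
    rw [h1]
    symm
    rw [List.count_eq_zero]
    intro hmem
    exact ha (h a hmem)

theorem pv_char_le (i j : Nat) (hi : i < 128) (hj : j < 128) (hij : i ≤ j) :
    Char.ofNat i ≤ Char.ofNat j := by
  have h1 := pv_toNat_ofNat i hi
  have h2 := pv_toNat_ofNat j hj
  have : (Char.ofNat i).toNat ≤ (Char.ofNat j).toNat := by omega
  exact this

theorem pv_canon_pairwise (l : List Char) : (pvCanon l).Pairwise (· ≤ ·) := by
  rw [pvCanon]
  apply List.pairwise_flatMap.mpr
  constructor
  · intro i _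
    exact List.pairwise_replicate.mpr (Or.inr le_rfl)
  · have hlt : (List.range 128).Pairwise (· < ·) := List.pairwise_lt_range
    apply hlt.imp_of_mem
    intro i j hi hj hij x hx y hy
    rw [List.eq_of_mem_replicate hx, List.eq_of_mem_replicate hy]
    exact pv_char_le i j (List.mem_range.mp hi) (List.mem_range.mp hj) (le_of_lt hij)

theorem pv_sorted_eq_canon (l : List Char) (h : ∀ c ∈ l, c.toNat < 128) :
    PySem.List.sorted l (fun c => c) false = pvCanon l :=
  PySem.List.sorted_id_eq_of_perm_of_pairwise l (pvCanon l) (pv_canon_perm l h)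
    (pv_canon_pairwise l)

theorem pv_canon_decomp (l : List Char) :
    pvCanon l = (List.range' 0 48).flatMap (pvBlk l) ++ (List.range' 48 10).flatMap (pvBlk l)
      ++ (List.range' 58 70).flatMap (pvBlk l) := by
  have hr : List.range 128 = List.range' 0 48 ++ List.range' 48 10 ++ List.range' 58 70 := by
    decide
  rw [pvCanon, hr]
  simp [List.flatMap_append]

-- A's loop consumes a digit prefix ds and breaks at the first non-digit character c
theorem pv_loop_break (ds : List Char) (c : Char) (t : List Char)
    (hds : ∀ x ∈ ds, 48 ≤ x.toNat ∧ x.toNat < 58)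
    (hc128 : c.toNat < 128) (hc : ¬ (48 ≤ c.toNat ∧ c.toNat < 58)) :
    ∀ (i : Nat) (n : Int) (idx : Nat),
      (solutionLoop (ds ++ c :: t) i n idx).1 = n + (ds.map pvDigitVal).sum ∧
      (solutionLoop (ds ++ c :: t) i n idx).2.2 = i + ds.length := by
  induction ds with
  | nil =>
    intro i n idx
    simp [solutionLoop, pv_ofChars_singleton c hc128, hc]
  | cons d ds ih =>
    intro i n idx
    have hd := hds d (by simp)
    have hrec := ih (fun x hx => hds x (by simp [hx])) (i + 1) (n + ((d.toNat : Int) - 48)) i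
    simp only [List.cons_append, solutionLoop, pv_ofChars_singleton d (by omega), if_pos hd]
    refine ⟨?_, ?_⟩
    · rw [hrec.1]; simp [pvDigitVal]; ring
    · rw [hrec.2]; simp; omega

-- on an all-digit list A's loop completes; Python leaves i = length - 1
theorem pv_loop_all (ds : List Char) (hds : ∀ x ∈ ds, 48 ≤ x.toNat ∧ x.toNat < 58) :
    ∀ (i : Nat) (n : Int) (idx : Nat),
      (solutionLoop ds i n idx).1 = n + (ds.map pvDigitVal).sum ∧
      (solutionLoop ds i n idx).2.2 = i + ds.length - 1 := by
  induction ds with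
  | nil => intro i n idx; simp [solutionLoop]
  | cons d ds ih =>
    intro i n idx
    have hd := hds d (by simp)
    have hrec := ih (fun x hx => hds x (by simp [hx])) (i + 1) (n + ((d.toNat : Int) - 48)) i
    simp only [solutionLoop, pv_ofChars_singleton d (by omega), if_pos hd]
    refine ⟨?_, ?_⟩
    · rw [hrec.1]; simp [pvDigitVal]; ring
    · rw [hrec.2]; simp only [List.length_cons]; omega

-- B's scan on a digit prefix followed by a non-digit (or nothing): sums the prefix
theorem pv_scan_break (ds : List Char) (c : Char) (t : List Char)
    (hds : ∀ x ∈ ds, 48 ≤ x.toNat ∧ x.toNat < 58)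
    (hc : ¬ (48 ≤ c.toNat ∧ c.toNat < 58)) :
    ∀ (total : Int) (k : Nat),
      solutionAltScan (ds ++ c :: t) total k = (total + (ds.map pvDigitVal).sum, k + ds.length) := by
  induction ds with
  | nil =>
    intro total k
    have : ¬ (48 ≤ c.toNat ∧ c.toNat ≤ 57) := by omega
    simp [solutionAltScan, this]
  | cons d ds ih =>
    intro total k
    have hd := hds d (by simp)
    have hd' : 48 ≤ d.toNat ∧ d.toNat ≤ 57 := by omega
    simp only [List.cons_append, solutionAltScan, if_pos hd']
    rw [ih (fun x hx => hds x (by simp [hx]))]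
    simp [pvDigitVal]
    constructor
    · ring
    · omega

theorem pv_scan_all (ds : List Char) (hds : ∀ x ∈ ds, 48 ≤ x.toNat ∧ x.toNat < 58) :
    ∀ (total : Int) (k : Nat),
      solutionAltScan ds total k = (total + (ds.map pvDigitVal).sum, k + ds.length) := by
  induction ds with
  | nil => intro total k; simp [solutionAltScan]
  | cons d ds ih =>
    intro total k
    have hd := hds d (by simp)
    have hd' : 48 ≤ d.toNat ∧ d.toNat ≤ 57 := by omega
    simp only [solutionAltScan, if_pos hd']
    rw [ih (fun x hx => hds x (by simp [hx]))]
    simp [pvDigitVal]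
    constructor
    · ring
    · omega

-- B's counts table holds exactly the character counts
theorem pv_counts_aux (l : List Char) :
    ∀ (cs : List Nat), cs.length = 128 → (∀ c ∈ l, c.toNat < 128) →
      ∀ i < 128,
        (l.foldl (fun cs c => cs.set c.toNat (cs.getD c.toNat 0 + 1)) cs).getD i 0 =
          cs.getD i 0 + l.countP (fun c => c.toNat == i) := by
  induction l with
  | nil => intro cs _ _ i _; simp
  | cons c t ih =>
    intro cs hlen hl i hi
    have hc : c.toNat < 128 := hl c (by simp)
    have hlen' : (cs.set c.toNat (cs.getD c.toNat 0 + 1)).length = 128 := by simp [hlen]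
    rw [List.foldl_cons,
      ih _ hlen' (fun x hx => hl x (by simp [hx])) i hi,
      pv_getD_set_nat cs _ i _ 0 (by omega),
      List.countP_cons]
    by_cases hEq : i = c.toNat
    · simp [hEq]; omega
    · have h2 : (c.toNat == i) = false := by simp; omega
      simp [hEq, h2]

theorem pv_counts_getD (l : List Char) (h : ∀ c ∈ l, c.toNat < 128) (i : Nat) (hi : i < 128) :
    (l.foldl (fun cs c => cs.set c.toNat (cs.getD c.toNat 0 + 1))
      (List.replicate 128 0)).getD i 0 = l.count (Char.ofNat i) := by
  rw [pv_counts_aux l (List.replicate 128 0) (by simp) h i hi]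
  have h1 : l.countP (fun c => c.toNat == i) = l.count (Char.ofNat i) := by
    rw [List.count]
    apply List.countP_congr
    intro x hx
    have hx128 := h x hx
    constructor
    · intro hxi
      have : x.toNat = i := by simpa using hxi
      simp [← this, Char.ofNat_toNat]
    · intro hxe
      have : x = Char.ofNat i := by simpa using hxe
      simp [this, pv_toNat_ofNat i hi]
  rw [h1]
  rw [List.getD_eq_getElem?_getD, List.getElem?_replicate]
  simp [hi]

theorem pv_mem_range'_flatMap (l : List Char) (s n : Nat) (hsn : s + n ≤ 128) (c : Char)
    (hc : c ∈ (List.range' s n).flatMap (pvBlk l)) : s ≤ c.toNat ∧ c.toNat < s + n := by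
  rw [List.mem_flatMap] at hc
  obtain ⟨i, hi, hci⟩ := hc
  rw [List.mem_range'_1] at hi
  rw [pvBlk] at hci
  rw [List.eq_of_mem_replicate hci, pv_toNat_ofNat i (by omega)]
  omega

theorem pv_flatMap_eq_nil_iff (l : List Char) (r : List Nat) :
    (r.flatMap (pvBlk l)) = [] ↔ ∀ i ∈ r, l.count (Char.ofNat i) = 0 := by
  rw [List.flatMap_eq_nil_iff]
  constructor
  · intro h i hi
    have := h _ hi
    simpa [pvBlk] using this
  · intro h i hi
    simp [pvBlk, h i hi]

theorem pv_low_nil (l : List Char) (h : ∀ c ∈ l, ¬ c.toNat < 48) :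
    (List.range' 0 48).flatMap (pvBlk l) = [] := by
  rw [pv_flatMap_eq_nil_iff]
  intro i hi
  rw [List.mem_range'_1] at hi
  rw [List.count_eq_zero]
  intro hmem
  exact h _ hmem (by rw [pv_toNat_ofNat i (by omega)]; omega)

-- B's built string equals the canonical counting-sort layout
theorem pv_built_eq_canon (l : List Char) (h : ∀ c ∈ l, c.toNat < 128) :
    (List.range 128).foldl (fun acc i => acc ++ List.replicate
        ((l.foldl (fun cs c => cs.set c.toNat (cs.getD c.toNat 0 + 1))
          (List.replicate 128 0)).getD i 0) (Char.ofNat i)) [] = pvCanon l := by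
  rw [PySem.List.foldl_append_eq_flatMap, List.nil_append, pvCanon]
  apply List.flatMap_congr
  intro i hi
  rw [List.mem_range] at hi
  rw [pv_counts_getD l h i hi, pvBlk]

theorem pv_ofList_inj (xs ys : List Char) (h : String.ofList xs = String.ofList ys) :
    xs = ys := by
  have := congrArg String.toList h
  simpa [String.toList_ofList] using this

theorem pv_high_nil (l : List Char) (h : ∀ c ∈ l, 48 ≤ c.toNat ∧ c.toNat < 58) :
    (List.range' 58 70).flatMap (pvBlk l) = [] := by
  rw [pv_flatMap_eq_nil_iff]
  intro i hi
  rw [List.mem_range'_1] at hi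
  rw [List.count_eq_zero]
  intro hmem
  have := h _ hmem
  rw [pv_toNat_ofNat i (by omega)] at this
  omega

theorem pv_toList_ne_nil (S : String) (h : S ≠ "") : S.toList ≠ [] := by
  intro h0
  exact h (by
    have := congrArg String.ofList h0
    simpa [String.ofList_toList] using this)

-- ===== VERDICT (by name: the statement is the Claim_ definition above) =====
theorem solution_spec : Claim_unchanged_solution := by
  intro S hDom hPre hND
  have h128 := pv_dom_lt S hDom
  have hlne : S.toList ≠ [] := pv_toList_ne_nil S hPre
  simp only [solution, solution_alt]
  rw [pv_sorted_eq_canon S.toList h128, pv_built_eq_canon S.toList h128]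
  have hds : ∀ x ∈ (List.range' 48 10).flatMap (pvBlk S.toList),
      48 ≤ x.toNat ∧ x.toNat < 58 := by
    intro x hx
    have := pv_mem_range'_flatMap S.toList 48 10 (by omega) x hx
    omega
  by_cases hLow : ∃ c ∈ S.toList, c.toNat < 48
  · -- some character sorts below '0': neither loop consumes anything
    obtain ⟨c0, hc0, hc0lt⟩ := hLow
    have hlowne : (List.range' 0 48).flatMap (pvBlk S.toList) ≠ [] := by
      intro h0
      have := (pv_flatMap_eq_nil_iff S.toList _).mp h0 c0.toNat
        (by rw [List.mem_range'_1]; omega)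
      rw [Char.ofNat_toNat, List.count_eq_zero] at this
      exact this hc0
    rcases hl : (List.range' 0 48).flatMap (pvBlk S.toList) with _ | ⟨c, lt⟩
    · exact absurd hl hlowne
    · have hcmem : c ∈ (List.range' 0 48).flatMap (pvBlk S.toList) := by
        rw [hl]; exact List.mem_cons_self
      have hcb := pv_mem_range'_flatMap S.toList 0 48 (by omega) c hcmem
      rw [pv_canon_decomp, hl]
      simp only [List.cons_append, List.append_assoc]
      have hloopA := pv_loop_break [] c (lt ++ ((List.range' 48 10).flatMap (pvBlk S.toList)
          ++ (List.range' 58 70).flatMap (pvBlk S.toList)))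
        (by intro x hx; simp at hx) (by omega) (by omega) 0 0 0
      have hloopB := pv_scan_break [] c (lt ++ ((List.range' 48 10).flatMap (pvBlk S.toList)
          ++ (List.range' 58 70).flatMap (pvBlk S.toList)))
        (by intro x hx; simp at hx) (by omega) 0 0
      simp only [List.nil_append] at hloopA hloopB
      rw [hloopA.1, hloopA.2, hloopB]
  · -- every character is '0' or above: both loops sum the sorted digit prefix
    push_neg at hLow
    have hlownil : (List.range' 0 48).flatMap (pvBlk S.toList) = [] :=
      pv_low_nil S.toList (by intro c hc; have := hLow c hc; omega)
    have hNotAll : ¬ (S.toList.all (fun c => 48 ≤ c.toNat && c.toNat < 58) = true) := by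
      intro hall
      exact hND ⟨hPre, hall⟩
    obtain ⟨c0, hc0, hc0nd⟩ : ∃ c ∈ S.toList, ¬ (48 ≤ c.toNat ∧ c.toNat < 58) := by
      by_contra hposs
      push_neg at hposs
      exact hNotAll (List.all_eq_true.mpr (by
        intro x hx
        have := hposs x hx
        simp
        omega))
    have hc0high : c0 ∈ (List.range' 58 70).flatMap (pvBlk S.toList) := by
      have hmem : c0 ∈ pvCanon S.toList := ((pv_canon_perm S.toList h128).mem_iff).mpr hc0
      rw [pv_canon_decomp, hlownil, List.nil_append, List.mem_append] at hmem
      rcases hmem with hmem | hmem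
      · have := pv_mem_range'_flatMap S.toList 48 10 (by omega) c0 hmem
        omega
      · exact hmem
    rcases hh : (List.range' 58 70).flatMap (pvBlk S.toList) with _ | ⟨hc, ht⟩
    · rw [hh] at hc0high; simp at hc0high
    · have hhmem : hc ∈ (List.range' 58 70).flatMap (pvBlk S.toList) := by
        rw [hh]; exact List.mem_cons_self
      have hhb := pv_mem_range'_flatMap S.toList 58 70 (by omega) hc hhmem
      rw [pv_canon_decomp, hlownil, List.nil_append, hh]
      have hloopA := pv_loop_break ((List.range' 48 10).flatMap (pvBlk S.toList)) hc ht
        hds (by omega) (by omega) 0 0 0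
      have hloopB := pv_scan_break ((List.range' 48 10).flatMap (pvBlk S.toList)) hc ht
        hds (by omega) 0 0
      rw [hloopA.1, hloopA.2, hloopB]

set_option maxRecDepth 4000 in
theorem solution_changed : Claim_changed_solution := by
  unfold Claim_changed_solution; decide

theorem solution_tight : Claim_exact_solution := by
  intro S hDom hPre hD heq
  have h128 := pv_dom_lt S hDom
  have hlne : S.toList ≠ [] := pv_toList_ne_nil S hPre
  have hdig : ∀ x ∈ S.toList, 48 ≤ x.toNat ∧ x.toNat < 58 := by
    intro x hx
    have := List.all_eq_true.mp hD.2 x hx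
    simp at this
    omega
  have hlownil : (List.range' 0 48).flatMap (pvBlk S.toList) = [] :=
    pv_low_nil S.toList (by intro c hc; have := hdig c hc; omega)
  have hhighnil := pv_high_nil S.toList hdig
  have hcanon : pvCanon S.toList = (List.range' 48 10).flatMap (pvBlk S.toList) := by
    rw [pv_canon_decomp, hlownil, hhighnil, List.nil_append, List.append_nil]
  have hdigne : (List.range' 48 10).flatMap (pvBlk S.toList) ≠ [] := by
    intro h0
    have hcn : pvCanon S.toList = [] := by rw [hcanon, h0]
    have hp := pv_canon_perm S.toList h128
    rw [hcn] at hp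
    exact hlne (List.perm_nil.mp hp.symm)
  have hdigds : ∀ x ∈ (List.range' 48 10).flatMap (pvBlk S.toList),
      48 ≤ x.toNat ∧ x.toNat < 58 := by
    intro x hx
    have := pv_mem_range'_flatMap S.toList 48 10 (by omega) x hx
    omega
  simp only [solution, solution_alt] at heq
  rw [pv_sorted_eq_canon S.toList h128, pv_built_eq_canon S.toList h128, hcanon] at heq
  have hloopA := pv_loop_all ((List.range' 48 10).flatMap (pvBlk S.toList)) hdigds 0 0 0
  have hloopB := pv_scan_all ((List.range' 48 10).flatMap (pvBlk S.toList)) hdigds 0 0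
  rw [hloopA.1, hloopA.2, hloopB] at heq
  have hlists := pv_ofList_inj _ _ heq
  have hlen := congrArg List.length hlists
  rw [List.length_append, List.length_append, List.length_drop, List.length_drop] at hlen
  have hpos : 0 < ((List.range' 48 10).flatMap (pvBlk S.toList)).length :=
    List.length_pos_iff.mpr hdigne
  simp only [Int.zero_add, Nat.zero_add] at hlen
  omega
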